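-- pv_equiv track=rewrite | github.com/emanielsen/Behavior-Tracker---L-pez-Durand-Nielsen-Soldo-Palomares | metricas.py | calcular_uso_por_app
-- ===== SOURCE A (Python) =====
-- def calcular_uso_por_app(datos):
--     '''
--     Calcula el tiempo total de uso por cada aplicación.
--
--     Parameters
--     ----------
--     datos : lista
--         lista con los registros del participante.
--
--     Returns
--     -------
--     uso_apps : dicc
--         diccionario con las apps como claves y el tiempo total como valor.
--
--     '''
--     uso_apps = {}
--
--     for registro in datos:
--         app = registro[2]
--         tiempo = registro[4]
--
--         if app not in uso_apps:
--             uso_apps[app] = 0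
--
--         uso_apps[app] += tiempo
--
--     return uso_apps
-- ===== SOURCE B (Python) =====
-- def calcular_uso_por_app(datos):
--     # Two-pass re-implementation: first collect the apps in first-appearance
--     # order, then compute each app's total as one sum over its records.
--     apps = dict.fromkeys(r[2] for r in datos)
--     return {app: sum(r[4] for r in datos if r[2] == app) for app in apps}
-- ===== Notes on version B (the rewrite author's own statement) =====
-- stated objective: alternative
-- what changed: Replaces the single accumulating-dict scan with a two-pass strategy: dedupe the app keys once (first-appearance order), then build each app's total by a direct per-key sum over the records.
import Mathlib
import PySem

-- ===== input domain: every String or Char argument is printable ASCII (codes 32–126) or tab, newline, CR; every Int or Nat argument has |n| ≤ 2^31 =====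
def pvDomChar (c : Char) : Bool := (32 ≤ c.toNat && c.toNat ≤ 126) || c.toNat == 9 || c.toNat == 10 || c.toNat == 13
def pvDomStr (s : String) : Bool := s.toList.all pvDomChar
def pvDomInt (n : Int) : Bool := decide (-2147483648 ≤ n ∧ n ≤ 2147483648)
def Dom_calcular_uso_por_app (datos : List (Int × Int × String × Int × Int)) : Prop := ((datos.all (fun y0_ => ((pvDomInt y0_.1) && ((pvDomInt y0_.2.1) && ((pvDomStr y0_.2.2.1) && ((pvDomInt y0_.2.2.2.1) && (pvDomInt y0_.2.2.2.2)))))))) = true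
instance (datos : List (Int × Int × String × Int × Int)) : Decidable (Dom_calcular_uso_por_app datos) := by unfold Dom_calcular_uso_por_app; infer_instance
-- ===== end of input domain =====

-- B replaces A's accumulating-dict scan by a two-pass strategy (dedupe keys, then per-key sums); alternative decomposition, not faster.


-- ===== PORT A =====
-- one iteration of A's loop body
def pvStepA (uso : PySem.Dict String Int) (registro : Int × Int × String × Int × Int) : PySem.Dict String Int :=
  let app := registro.2.2.1
  let tiempo := registro.2.2.2.2
  let uso := if uso.contains app then uso else uso.insert app 0
  uso.insert app (uso.getD app 0 + tiempo)

def calcular_uso_por_app (datos : List (Int × Int × String × Int × Int)) : List (String × Int) :=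
  (datos.foldl pvStepA (PySem.Dict.empty : PySem.Dict String Int)).items

-- ===== PORT B =====
-- sum(r[4] for r in datos if r[2] == app)
def pvSumB (datos : List (Int × Int × String × Int × Int)) (app : String) : Int :=
  ((datos.filter (fun r => r.2.2.1 == app)).map (fun r => r.2.2.2.2)).sum

def calcular_uso_por_app_alt (datos : List (Int × Int × String × Int × Int)) : List (String × Int) :=
  let apps := PySem.List.dedup (datos.map (fun r => r.2.2.1))
  apps.map (fun app => (app, pvSumB datos app))

-- ===== PRECONDITION & SPEC =====
def Spec_calcular_uso_por_app (datos : List (Int × Int × String × Int × Int)) (out : List (String × Int)) : Prop := out = calcular_uso_por_app_alt datos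
instance (datos : List (Int × Int × String × Int × Int)) (out : List (String × Int)) : Decidable (Spec_calcular_uso_por_app datos out) := by unfold Spec_calcular_uso_por_app; infer_instance

-- ===== CLAIM (what is proved, stated in full; the proofs are below) =====
def Claim_equal_calcular_uso_por_app : Prop := ∀ (datos : List (Int × Int × String × Int × Int)), Dom_calcular_uso_por_app datos → Spec_calcular_uso_por_app datos (calcular_uso_por_app datos)

-- ===== LEMMAS AND PROOFS =====

theorem pvSumB_append_singleton (ds : List (Int × Int × String × Int × Int)) (r : Int × Int × String × Int × Int) (a : String) :
    pvSumB (ds ++ [r]) a = pvSumB ds a + (if r.2.2.1 = a then r.2.2.2.2 else 0) := by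
  simp [pvSumB, List.filter_append]
  split_ifs with h <;> simp [h]

theorem pvSumB_eq_zero_of_not_mem (ds : List (Int × Int × String × Int × Int)) (a : String)
    (h : a ∉ ds.map (fun r => r.2.2.1)) : pvSumB ds a = 0 := by
  have : ds.filter (fun r => r.2.2.1 == a) = [] := by
    rw [List.filter_eq_nil_iff]
    intro r hr hra
    exact h (List.mem_map.2 ⟨r, hr, by simpa using hra⟩)
  simp [pvSumB, this]

theorem pvDedup_append_singleton {α : Type} [DecidableEq α] (l : List α) (k : α) :
    PySem.List.dedup (l ++ [k]) =
      if k ∈ PySem.List.dedup l then PySem.List.dedup l else PySem.List.dedup l ++ [k] := by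
  simp only [PySem.List.dedup_eq_ofList, PySem.Set.ofList_eq_foldl, List.foldl_append,
    List.foldl_cons, List.foldl_nil]
  rw [← PySem.Set.ofList_eq_foldl]
  simp [PySem.Set.add, PySem.Set.contains]

theorem itemsA_eq_alt (ds : List (Int × Int × String × Int × Int)) :
    (ds.foldl pvStepA (PySem.Dict.empty : PySem.Dict String Int)).items = calcular_uso_por_app_alt ds := by
  induction ds using List.reverseRecOn with
  | nil => rfl
  | append_singleton ds r ih =>
    rw [List.foldl_append, List.foldl_cons, List.foldl_nil]
    set D := ds.foldl pvStepA (PySem.Dict.empty : PySem.Dict String Int) with hD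
    have hkeys : D.keys = PySem.List.dedup (ds.map (fun r => r.2.2.1)) := by
      show D.items.map (·.1) = _
      rw [ih]
      simp [calcular_uso_por_app_alt, Function.comp_def]
    have hnd : D.keys.Nodup := by rw [hkeys]; exact PySem.List.nodup_dedup _
    by_cases hmem : r.2.2.1 ∈ PySem.List.dedup (ds.map (fun r => r.2.2.1))
    · -- existing key: A overwrites in place, B's dedup list is unchanged
      have hcont : D.contains r.2.2.1 = true := (PySem.Dict.contains_iff_mem_keys D r.2.2.1).2 (hkeys ▸ hmem)
      have hitem : (r.2.2.1, pvSumB ds r.2.2.1) ∈ D.items := by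
        rw [ih]
        simp only [calcular_uso_por_app_alt, List.mem_map]
        exact ⟨r.2.2.1, hmem, rfl⟩
      have hgetD : D.getD r.2.2.1 0 = pvSumB ds r.2.2.1 := PySem.Dict.getD_of_mem_items D hitem hnd 0
      simp only [pvStepA, hcont, if_true]
      rw [PySem.Dict.items_insert_of_contains D _ hcont, ih, hgetD]
      simp only [calcular_uso_por_app_alt, List.map_append, List.map_cons, List.map_nil,
        pvDedup_append_singleton, hmem, if_true, List.map_map]
      apply List.map_congr_left
      intro a ha
      by_cases hak : a = r.2.2.1
      · subst hak
        simp [pvSumB_append_singleton]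
      · simp [Function.comp, hak, Ne.symm hak, pvSumB_append_singleton]
    · -- fresh key: A appends (k, t), B's dedup list gains k at the end
      have hcont : D.contains r.2.2.1 = false := by
        rw [← Bool.not_eq_true]
        exact fun h => hmem (hkeys ▸ (PySem.Dict.contains_iff_mem_keys D r.2.2.1).1 h)
      simp only [pvStepA, hcont, Bool.false_eq_true, if_false]
      rw [PySem.Dict.getD_insert_self, PySem.Dict.insert_insert_self,
        PySem.Dict.items_insert_of_not_contains D _ hcont, ih]
      have hknm : r.2.2.1 ∉ ds.map (fun r => r.2.2.1) := fun h => hmem ((PySem.List.mem_dedup _ _).2 h)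
      simp only [calcular_uso_por_app_alt, List.map_append, List.map_cons, List.map_nil,
        pvDedup_append_singleton, hmem, if_false]
      congr 1
      · apply List.map_congr_left
        intro a ha
        have hak : ¬ (r.2.2.1 = a) := fun h => hknm (h ▸ (PySem.List.mem_dedup _ _).1 ha)
        simp [pvSumB_append_singleton, hak]
      · simp [pvSumB_append_singleton, pvSumB_eq_zero_of_not_mem ds r.2.2.1 hknm]

-- ===== VERDICT (by name: the statement is the Claim_ definition above) =====
theorem calcular_uso_por_app_spec : Claim_equal_calcular_uso_por_app := by
  intro datos _
  show calcular_uso_por_app datos = calcular_uso_por_app_alt datos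
  exact itemsA_eq_alt datos
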